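-- pv_equiv track=rewrite | github.com/SwaonD/z01_group_maker | src/utils/str.py | _get_size_diffs
-- ===== SOURCE A (Python) =====
-- def _get_size_diffs(categories: list[list[str]]) -> list[int]:
-- 	max_length = []
-- 	for row in categories:
-- 		for i, elem in enumerate(row):
-- 			if i >= len(max_length):
-- 				max_length.append(len(elem))
-- 			elif len(elem) > max_length[i]:
-- 				max_length[i] = len(elem)
-- 	return max_length
-- ===== SOURCE B (Python) =====
-- def _get_size_diffs(categories: list[list[str]]) -> list[int]:
--     width = max((len(row) for row in categories), default=0)
--     return [max(len(row[i]) for row in categories if i < len(row))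
--             for i in range(width)]
-- ===== Notes on version B (the rewrite author's own statement) =====
-- stated objective: idiomatic
-- what changed: Replaces A's row-major loop that conditionally grows/updates a running max-length list with a column-major pass: compute the column count once, then take each column's maximum length directly in a comprehension.
import Mathlib
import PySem

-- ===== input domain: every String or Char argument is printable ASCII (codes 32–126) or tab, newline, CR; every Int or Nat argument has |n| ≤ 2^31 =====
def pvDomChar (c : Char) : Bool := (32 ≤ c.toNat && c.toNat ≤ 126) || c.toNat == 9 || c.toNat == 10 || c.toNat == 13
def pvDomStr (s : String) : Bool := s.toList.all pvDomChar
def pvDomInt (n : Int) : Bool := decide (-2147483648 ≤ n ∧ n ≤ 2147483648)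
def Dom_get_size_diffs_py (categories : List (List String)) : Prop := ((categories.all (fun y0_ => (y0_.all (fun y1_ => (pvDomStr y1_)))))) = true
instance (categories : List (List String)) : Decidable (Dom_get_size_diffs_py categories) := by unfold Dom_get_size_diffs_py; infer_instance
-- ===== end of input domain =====

-- B replaces A's row-major loop with a mutable growing list by a column-major
-- pass: the column count first, then each column's max length directly (alternative decomposition).

-- ===== PORT A =====
-- one step of A's inner 'for i, elem in enumerate(row)' loop
def pvStepA (ml : List Int) (p : Int × String) : List Int :=
  if p.1 ≥ PySem.List.len ml then ml ++ [PySem.Str.len p.2]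
  else if PySem.Str.len p.2 > PySem.List.pyGetD ml p.1 0 then
    PySem.List.pySetD ml p.1 (PySem.Str.len p.2)
  else ml

def get_size_diffs_py (categories : List (List String)) : List Int :=
  categories.foldl (fun max_length row => (PySem.List.enumerate row).foldl pvStepA max_length) []

-- ===== PORT B =====
-- max(len(row[i]) for row in categories if i < len(row)) with default=0
def pvColMax (categories : List (List String)) (i : Int) : Int :=
  match PySem.List.max?
      ((categories.filter (fun row => i < PySem.List.len row)).map
        (fun row => PySem.Str.len (PySem.List.pyGetD row i ""))) (fun x => x) with
  | some m => m
  | none => 0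

def get_size_diffs_py_alt (categories : List (List String)) : List Int :=
  let width : Int :=
    match PySem.List.max? (categories.map (fun row => PySem.List.len row)) (fun x => x) with
    | some m => m
    | none => 0
  (PySem.List.pyRange 0 width 1).map (fun i => pvColMax categories i)

-- ===== PRECONDITION & SPEC =====
def Spec_get_size_diffs_py (categories : List (List String)) (out : List Int) : Prop := out = get_size_diffs_py_alt categories
instance (categories : List (List String)) (out : List Int) : Decidable (Spec_get_size_diffs_py categories out) := by unfold Spec_get_size_diffs_py; infer_instance

-- ===== CLAIM (what is proved, stated in full; the proofs are below) =====
def Claim_equal_get_size_diffs_py : Prop := ∀ (categories : List (List String)), Dom_get_size_diffs_py categories → Spec_get_size_diffs_py categories (get_size_diffs_py categories)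

-- ===== LEMMAS AND PROOFS =====

-- elementwise max of two lists, padding the shorter one
def pvMerge : List Int → List Int → List Int
  | [], b => b
  | a, [] => a
  | x :: a, y :: b => max x y :: pvMerge a b

-- the number of columns
def pvWid (cats : List (List String)) : Nat :=
  cats.foldl (fun n row => max n row.length) 0

theorem pvMerge_nil_right (a : List Int) : pvMerge a [] = a := by
  cases a <;> rfl

theorem pvStepA_cons (z : Int) (ml : List Int) (k : Nat) (e : String) :
    pvStepA (z :: ml) ((k : Int) + 1, e) = z :: pvStepA ml ((k : Int), e) := by
  have hcast : (k : Int) + 1 = ((k + 1 : Nat) : Int) := by push_cast; ring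
  simp only [pvStepA, PySem.List.len_eq, List.length_cons, hcast,
    PySem.List.pyGetD_natCast, PySem.List.pySetD_natCast, PySem.Str.len_eq,
    List.getD_cons_succ, List.set_cons_succ]
  by_cases h : ml.length ≤ k
  · have c1 : (((k + 1 : Nat) : Int) ≥ ((ml.length + 1 : Nat) : Int)) := by omega
    have c2 : (((k : Nat) : Int) ≥ ((ml.length : Nat) : Int)) := by omega
    simp only [if_pos c1, if_pos c2]
    rfl
  · have c1 : ¬ (((k + 1 : Nat) : Int) ≥ ((ml.length + 1 : Nat) : Int)) := by omega
    have c2 : ¬ (((k : Nat) : Int) ≥ ((ml.length : Nat) : Int)) := by omega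
    simp only [if_neg c1, if_neg c2]
    split_ifs <;> rfl

theorem pvFold_enum_shift (row : List String) : ∀ (k : Nat) (z : Int) (ml : List Int),
    (PySem.List.enumerate row ((k : Int) + 1)).foldl pvStepA (z :: ml)
      = z :: (PySem.List.enumerate row (k : Int)).foldl pvStepA ml := by
  induction row with
  | nil => intro k z ml; simp [PySem.List.enumerate_nil]
  | cons y r ih =>
    intro k z ml
    rw [PySem.List.enumerate_cons, PySem.List.enumerate_cons]
    simp only [List.foldl_cons]
    rw [pvStepA_cons]
    have hc : (k : Int) + 1 + 1 = ((k + 1 : Nat) : Int) + 1 := by push_cast; ring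
    have hc2 : (k : Int) + 1 = ((k + 1 : Nat) : Int) := by push_cast; ring
    rw [hc, ih (k + 1), hc2]

theorem pvRow_merge (row : List String) : ∀ (acc : List Int),
    (PySem.List.enumerate row 0).foldl pvStepA acc
      = pvMerge acc (row.map (fun e => PySem.Str.len e)) := by
  induction row with
  | nil => intro acc; simp [PySem.List.enumerate_nil, pvMerge_nil_right]
  | cons y r ih =>
    intro acc
    rw [PySem.List.enumerate_cons]
    simp only [List.foldl_cons, List.map_cons]
    cases acc with
    | nil =>
      have hstep : pvStepA [] (0, y) = [PySem.Str.len y] := by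
        simp [pvStepA]
      rw [hstep]
      have h01 : (0 : Int) + 1 = ((0 : Nat) : Int) + 1 := by norm_num
      rw [h01, pvFold_enum_shift r 0 (PySem.Str.len y) []]
      have : ((0 : Nat) : Int) = (0 : Int) := by norm_num
      rw [this, ih]
      rfl
    | cons x a =>
      have hstep : pvStepA (x :: a) (0, y) = max x (PySem.Str.len y) :: a := by
        simp only [pvStepA, PySem.List.len_eq, List.length_cons]
        have hne : ¬ ((0 : Int) ≥ ((a.length + 1 : Nat) : Int)) := by omega
        have hget : PySem.List.pyGetD (x :: a) (0 : Int) 0 = x := by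
          have : (0 : Int) = ((0 : Nat) : Int) := by norm_num
          rw [this, PySem.List.pyGetD_natCast]; rfl
        have hset : ∀ v, PySem.List.pySetD (x :: a) (0 : Int) v = v :: a := by
          intro v
          have : (0 : Int) = ((0 : Nat) : Int) := by norm_num
          rw [this, PySem.List.pySetD_natCast]; rfl
        rw [if_neg hne, hget]
        by_cases hgt : PySem.Str.len y > x
        · rw [if_pos hgt, hset, max_eq_right hgt.le]
        · rw [if_neg hgt, max_eq_left (by omega)]
      rw [hstep]
      have h01 : (0 : Int) + 1 = ((0 : Nat) : Int) + 1 := by norm_num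
      rw [h01, pvFold_enum_shift r 0 (max x (PySem.Str.len y)) a]
      have : ((0 : Nat) : Int) = (0 : Int) := by norm_num
      rw [this, ih]
      rfl

-- A is a fold of pvMerge over mapped rows
theorem pvA_eq_fold (cats : List (List String)) :
    get_size_diffs_py cats
      = cats.foldl (fun acc row => pvMerge acc (row.map (fun e => PySem.Str.len e))) [] := by
  unfold get_size_diffs_py
  congr 1
  funext acc row
  exact pvRow_merge row acc

theorem pvMerge_length (a b : List Int) : (pvMerge a b).length = max a.length b.length := by
  induction a generalizing b with
  | nil => simp [pvMerge]
  | cons x a ih =>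
    cases b with
    | nil => simp [pvMerge]
    | cons y b => simp [pvMerge, ih]; try omega

theorem pvMerge_nonneg (a b : List Int) (ha : ∀ v ∈ a, 0 ≤ v) (hb : ∀ v ∈ b, 0 ≤ v) :
    ∀ v ∈ pvMerge a b, 0 ≤ v := by
  induction a generalizing b with
  | nil => simpa [pvMerge] using hb
  | cons x a ih =>
    cases b with
    | nil => simpa [pvMerge] using ha
    | cons y b =>
      intro v hv
      simp only [pvMerge, List.mem_cons] at hv
      rcases hv with rfl | hv
      · exact le_max_of_le_left (ha x (by simp))
      · exact ih b (fun w hw => ha w (by simp [hw])) (fun w hw => hb w (by simp [hw])) v hv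

theorem pvMerge_getD (a b : List Int) (ha : ∀ v ∈ a, 0 ≤ v) (hb : ∀ v ∈ b, 0 ≤ v) (i : Nat) :
    (pvMerge a b).getD i 0 = max (a.getD i 0) (b.getD i 0) := by
  induction a generalizing b i with
  | nil =>
    simp only [pvMerge, List.getD]
    cases h : b[i]? with
    | none => simp
    | some v =>
      have hv : 0 ≤ v := hb v (List.mem_of_getElem? h)
      simp [max_eq_right hv]
  | cons x a ih =>
    cases b with
    | nil =>
      rw [pvMerge_nil_right]
      simp only [List.getD]
      cases h : (x :: a)[i]? with
      | none => simp
      | some v =>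
        have hv : 0 ≤ v := ha v (List.mem_of_getElem? h)
        simp [max_eq_left hv]
    | cons y b =>
      cases i with
      | zero => simp [pvMerge]
      | succ n =>
        simp only [pvMerge, List.getD_cons_succ]
        exact ih b (fun w hw => ha w (by simp [hw])) (fun w hw => hb w (by simp [hw])) n

-- value of column k in a row (0 beyond the row's end)
def pvVal (k : Nat) (row : List String) : Int := PySem.Str.len (row.getD k "")

theorem pvStrLen_nonneg (s : String) : 0 ≤ PySem.Str.len s := by
  rw [PySem.Str.len_eq]; exact Int.natCast_nonneg _

theorem pvRowMap_getD (row : List String) (k : Nat) :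
    (row.map (fun e => PySem.Str.len e)).getD k 0 = pvVal k row := by
  unfold pvVal
  by_cases h : k < row.length
  · rw [List.getD_eq_getElem _ _ (by simpa using h), List.getD_eq_getElem _ _ h]
    simp
  · rw [List.getD_eq_default _ _ (by simpa using Nat.le_of_not_lt h),
        List.getD_eq_default _ _ (Nat.le_of_not_lt h)]
    decide

theorem pvFold_length (cats : List (List String)) : ∀ (acc : List Int),
    (cats.foldl (fun acc row => pvMerge acc (row.map (fun e => PySem.Str.len e))) acc).length
      = cats.foldl (fun n row => max n row.length) acc.length := by
  induction cats with
  | nil => intro acc; rfl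
  | cons c cs ih =>
    intro acc
    simp only [List.foldl_cons]
    rw [ih, pvMerge_length]
    simp

theorem pvFold_getD (cats : List (List String)) (k : Nat) : ∀ (acc : List Int), (∀ v ∈ acc, 0 ≤ v) →
    (cats.foldl (fun acc row => pvMerge acc (row.map (fun e => PySem.Str.len e))) acc).getD k 0
      = cats.foldl (fun v row => max v (pvVal k row)) (acc.getD k 0) := by
  induction cats with
  | nil => intro acc _; rfl
  | cons c cs ih =>
    intro acc hacc
    simp only [List.foldl_cons]
    have hmn : ∀ v ∈ c.map (fun e => PySem.Str.len e), 0 ≤ v := by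
      rintro v hv; simp only [List.mem_map] at hv
      obtain ⟨e, _, rfl⟩ := hv; exact pvStrLen_nonneg e
    rw [ih _ (pvMerge_nonneg _ _ hacc hmn), pvMerge_getD _ _ hacc hmn, pvRowMap_getD]

-- the fold over all rows equals the fold over rows long enough (short rows contribute 0)
theorem pvCol_filter (k : Nat) (cats : List (List String)) : ∀ (a : Int), 0 ≤ a →
    cats.foldl (fun v row => max v (pvVal k row)) a
      = ((cats.filter (fun row => (k : Int) < PySem.List.len row)).map
          (fun row => PySem.Str.len (PySem.List.pyGetD row (k : Int) ""))).foldl max a := by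
  induction cats with
  | nil => intro a _; rfl
  | cons c cs ih =>
    intro a ha
    simp only [List.foldl_cons]
    by_cases h : (k : Nat) < c.length
    · have hkeep : ((k : Int) < PySem.List.len c) = True := by
        simp [PySem.List.len_eq]; exact_mod_cast h
      rw [List.filter_cons_of_pos (by simp [PySem.List.len_eq]; exact_mod_cast h)]
      simp only [List.map_cons, List.foldl_cons]
      rw [PySem.List.pyGetD_natCast]
      have : pvVal k c = PySem.Str.len (c.getD k "") := rfl
      rw [this]
      exact ih _ (le_trans ha (le_max_left _ _))
    · rw [List.filter_cons_of_neg (by simp [PySem.List.len_eq]; omega)]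
      have hval : pvVal k c = 0 := by
        unfold pvVal
        rw [List.getD_eq_default _ _ (Nat.le_of_not_lt h)]
        decide
      rw [hval, max_eq_left ha]
      exact ih a ha

-- column k is inhabited whenever k < the fold-computed width
theorem pvWid_witness (cats : List (List String)) : ∀ (a k : Nat), a ≤ k →
    k < cats.foldl (fun n row => max n row.length) a → ∃ row ∈ cats, k < row.length := by
  induction cats with
  | nil => intro a k h1 h2; simp only [List.foldl_nil] at h2; omega
  | cons c cs ih =>
    intro a k h1 h2
    simp only [List.foldl_cons] at h2
    by_cases h : max a c.length ≤ k
    · obtain ⟨row, hm, hl⟩ := ih _ k h h2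
      exact ⟨row, by simp [hm], hl⟩
    · have : k < c.length := by omega
      exact ⟨c, by simp, this⟩

-- pvColMax at a real column index equals the running-max fold
theorem pvColMax_eq (cats : List (List String)) (k : Nat) (hk : k < pvWid cats) :
    pvColMax cats (k : Int) = cats.foldl (fun v row => max v (pvVal k row)) 0 := by
  obtain ⟨row, hmem, hlen⟩ := pvWid_witness cats 0 k (Nat.zero_le k) hk
  have hne : (cats.filter (fun row => (k : Int) < PySem.List.len row)) ≠ [] := by
    intro hnil
    have : row ∈ cats.filter (fun row => (k : Int) < PySem.List.len row) := by
      rw [List.mem_filter]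
      refine ⟨hmem, ?_⟩
      simp [PySem.List.len_eq]
      exact_mod_cast hlen
    rw [hnil] at this
    exact absurd this (List.not_mem_nil)
  rw [pvCol_filter k cats 0 le_rfl]
  cases hfe : (cats.filter (fun row => (k : Int) < PySem.List.len row)).map
      (fun row => PySem.Str.len (PySem.List.pyGetD row (k : Int) "")) with
  | nil =>
    exact absurd (List.map_eq_nil_iff.mp hfe) hne
  | cons w t =>
    unfold pvColMax
    rw [hfe, PySem.List.max?_id_cons]
    simp only [List.foldl_cons]
    have hw : 0 ≤ w := by
      have : w ∈ (w :: t) := by simp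
      rw [← hfe] at this
      simp only [List.mem_map] at this
      obtain ⟨r, _, hr⟩ := this
      rw [← hr, PySem.List.pyGetD_natCast]
      exact pvStrLen_nonneg _
    rw [max_eq_right hw]

-- the width computed by B equals pvWid
theorem pvWidthInt_cast (cs : List (List String)) : ∀ (a : Nat),
    (cs.map (fun row => PySem.List.len row)).foldl max ((a : Nat) : Int)
      = ((cs.foldl (fun n row => max n row.length) a : Nat) : Int) := by
  induction cs with
  | nil => intro a; rfl
  | cons c t ih =>
    intro a
    simp only [PySem.List.len_eq] at ih ⊢
    simp only [List.map_cons, List.foldl_cons]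
    have : max ((a : Nat) : Int) ((c.length : Nat) : Int) = ((max a c.length : Nat) : Int) := by
      push_cast; rfl
    rw [this, ih]

theorem pvWidth_eq (cats : List (List String)) :
    (match PySem.List.max? (cats.map (fun row => PySem.List.len row)) (fun x => x) with
      | some m => m | none => 0) = ((pvWid cats : Nat) : Int) := by
  cases cats with
  | nil => rfl
  | cons c cs =>
    simp only [List.map_cons, PySem.List.max?_id_cons]
    unfold pvWid
    simp only [List.foldl_cons, PySem.List.len_eq]
    have h0 : max 0 c.length = c.length := Nat.max_eq_right (Nat.zero_le _)
    rw [h0]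
    have h := pvWidthInt_cast cs c.length
    simp only [PySem.List.len_eq] at h
    exact h

-- ===== VERDICT (by name: the statement is the Claim_ definition above) =====
theorem get_size_diffs_py_spec : Claim_equal_get_size_diffs_py := by
  intro cats _
  unfold Spec_get_size_diffs_py get_size_diffs_py_alt
  rw [pvA_eq_fold]
  simp only [pvWidth_eq]
  rw [PySem.List.pyRange_zero_natCast]
  apply List.ext_getElem
  · rw [pvFold_length]
    simp [pvWid]
  · intro k hk1 hk2
    have hkw : k < pvWid cats := by
      simpa using hk2
    have hlen : (cats.foldl (fun acc row => pvMerge acc (row.map (fun e => PySem.Str.len e))) []).length = pvWid cats := by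
      rw [pvFold_length]; rfl
    simp only [List.getElem_map, List.getElem_range]
    have := pvFold_getD cats k [] (by simp)
    rw [List.getD_eq_getElem _ _ hk1] at this
    rw [this]
    rw [show (([] : List Int).getD k 0) = 0 from rfl]
    rw [pvColMax_eq cats k hkw]
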